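-- pv_equiv track=rewrite | github.com/arek-grows/Challenges | Challenges 301-320/Challenge320.py | count_two_character_matches
-- ===== SOURCE A (Python) =====
-- def count_two_character_matches(string_a: str, string_b: str) -> int:
--     total = 0
--     for ii in range(min(len(string_a), len(string_b)) - 1):
--         cons_a = string_a[ii] + string_a[ii + 1]
--         cons_b = string_b[ii] + string_b[ii + 1]
--         if cons_a == cons_b:
--             total += 1
--     return total  # Put your code here!!!
-- ===== SOURCE B (Python) =====
-- def count_two_character_matches(string_a: str, string_b: str) -> int:
--     matches = [x == y for x, y in zip(string_a, string_b)]
--     return sum(1 for p, q in zip(matches, matches[1:]) if p and q)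
-- ===== Notes on version B (the rewrite author's own statement) =====
-- stated objective: idiomatic
-- what changed: B first builds a per-position boolean equality table over the common prefix (zip of the two strings) and then counts adjacent True pairs in that table, instead of A's per-index construction and comparison of two-character substrings.
import Mathlib
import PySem

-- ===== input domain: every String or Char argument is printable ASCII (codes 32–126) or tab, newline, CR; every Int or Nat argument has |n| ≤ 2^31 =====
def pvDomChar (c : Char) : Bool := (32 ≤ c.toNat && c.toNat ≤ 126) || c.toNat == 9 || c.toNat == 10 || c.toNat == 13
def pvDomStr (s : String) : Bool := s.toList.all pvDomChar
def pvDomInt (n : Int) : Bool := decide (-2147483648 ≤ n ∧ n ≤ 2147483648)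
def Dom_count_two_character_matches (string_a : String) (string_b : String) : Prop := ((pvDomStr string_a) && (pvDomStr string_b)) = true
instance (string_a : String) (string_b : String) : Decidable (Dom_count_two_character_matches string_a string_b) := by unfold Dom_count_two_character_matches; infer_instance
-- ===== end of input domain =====

-- B replaces A's per-index two-character substring concatenation with a precomputed
-- per-position equality table scanned for adjacent True pairs (objective: idiomatic).

-- ===== PORT A =====
-- for ii in range(min(len(a), len(b)) - 1): compare a[ii]+a[ii+1] with b[ii]+b[ii+1]
def count_two_character_matches (string_a : String) (string_b : String) : Int :=
  let la := string_a.toList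
  let lb := string_b.toList
  (PySem.List.pyRange 0 (min (PySem.List.len la) (PySem.List.len lb) - 1) 1).foldl
    (fun total ii =>
      let cons_a := [PySem.List.pyGet? la ii, PySem.List.pyGet? la (ii + 1)]
      let cons_b := [PySem.List.pyGet? lb ii, PySem.List.pyGet? lb (ii + 1)]
      if cons_a == cons_b then total + 1 else total) 0

-- ===== PORT B =====
-- matches = [x == y for x, y in zip(a, b)]; sum(1 for p, q in zip(matches, matches[1:]) if p and q)
def count_two_character_matches_alt (string_a : String) (string_b : String) : Int :=
  let ms := List.zipWith (fun x y => x == y) string_a.toList string_b.toList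
  (ms.zip ms.tail).foldl
    (fun acc pq => if pq.1 && pq.2 then acc + 1 else acc) 0

-- ===== PRECONDITION & SPEC =====
def Spec_count_two_character_matches (string_a : String) (string_b : String) (out : Int) : Prop := out = count_two_character_matches_alt string_a string_b
instance (string_a : String) (string_b : String) (out : Int) : Decidable (Spec_count_two_character_matches string_a string_b out) := by unfold Spec_count_two_character_matches; infer_instance

-- ===== CLAIM (what is proved, stated in full; the proofs are below) =====
def Claim_equal_count_two_character_matches : Prop := ∀ (string_a : String) (string_b : String), Dom_count_two_character_matches string_a string_b → Spec_count_two_character_matches string_a string_b (count_two_character_matches string_a string_b)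

-- ===== LEMMAS AND PROOFS =====

-- the zip of a boolean list with its own tail, written as a map over indices
lemma zip_tail_eq_map_range (ms : List Bool) :
    ms.zip ms.tail =
      (List.range (ms.length - 1)).map (fun k => (ms.getD k false, ms.getD (k + 1) false)) := by
  apply List.ext_getElem
  · simp [List.length_zip]
  · intro k h1 h2
    have hk1 : k + 1 < ms.length := by simp [List.length_zip] at h1; omega
    simp [List.getElem_zip, List.getElem_tail, List.getD_eq_getElem?_getD, hk1,
      (by omega : k < ms.length)]

-- core fact on char lists: A's indexed fold equals B's adjacent-pair scan
lemma core (la lb : List Char) :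
    (PySem.List.pyRange 0 (min (PySem.List.len la) (PySem.List.len lb) - 1) 1).foldl
      (fun (total : Int) ii =>
        if [PySem.List.pyGet? la ii, PySem.List.pyGet? la (ii + 1)]
            == [PySem.List.pyGet? lb ii, PySem.List.pyGet? lb (ii + 1)]
          then total + 1 else total) 0
    = ((List.zipWith (fun x y => x == y) la lb).zip
        (List.zipWith (fun x y => x == y) la lb).tail).foldl
        (fun (acc : Int) pq => if pq.1 && pq.2 then acc + 1 else acc) 0 := by
  have hmslen : (List.zipWith (fun x y : Char => x == y) la lb).length
      = min la.length lb.length := by simp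
  have htn : ((min (PySem.List.len la) (PySem.List.len lb) - 1) - 0).toNat
      = min la.length lb.length - 1 := by
    simp only [PySem.List.len_eq]; omega
  rw [PySem.List.pyRange_one, htn,
    zip_tail_eq_map_range (List.zipWith (fun x y : Char => x == y) la lb), hmslen,
    List.foldl_map, List.foldl_map]
  simp only [zero_add]
  apply PySem.List.foldl_congr_mem
  intro acc k hkmem
  have hk : k < min la.length lb.length - 1 := List.mem_range.mp hkmem
  have hk1 : k + 1 < min la.length lb.length := by omega
  have g1 : PySem.List.pyGet? la ((k:Int)) = some (la[k]'(by omega)) := by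
    simp [(by omega : k < la.length)]
  have g2 : PySem.List.pyGet? la ((k:Int) + 1) = some (la[k+1]'(by omega)) := by
    rw [show ((k:Int) + 1) = ((k + 1 : Nat) : Int) from by push_cast; ring,
      PySem.List.pyGet?_natCast]
    exact List.getElem?_eq_getElem (by omega)
  have g3 : PySem.List.pyGet? lb ((k:Int)) = some (lb[k]'(by omega)) := by
    simp [(by omega : k < lb.length)]
  have g4 : PySem.List.pyGet? lb ((k:Int) + 1) = some (lb[k+1]'(by omega)) := by
    rw [show ((k:Int) + 1) = ((k + 1 : Nat) : Int) from by push_cast; ring,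
      PySem.List.pyGet?_natCast]
    exact List.getElem?_eq_getElem (by omega)
  have m1 : (List.zipWith (fun x y : Char => x == y) la lb).getD k false
      = (la[k]'(by omega) == lb[k]'(by omega)) := by
    rw [List.getD_eq_getElem _ false (by rw [hmslen]; omega)]
    simp
  have m2 : (List.zipWith (fun x y : Char => x == y) la lb).getD (k+1) false
      = (la[k+1]'(by omega) == lb[k+1]'(by omega)) := by
    rw [List.getD_eq_getElem _ false (by rw [hmslen]; omega)]
    simp
  simp only [g1, g2, g3, g4, m1, m2]
  simp


-- ===== VERDICT (by name: the statement is the Claim_ definition above) =====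
theorem count_two_character_matches_spec : Claim_equal_count_two_character_matches := by
  intro a b _
  show count_two_character_matches a b = count_two_character_matches_alt a b
  simp only [count_two_character_matches, count_two_character_matches_alt]
  exact core a.toList b.toList
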